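-- pv_equiv track=rewrite | github.com/SDET-SOLOMAN/code_wars_python | kata_7s/find_all_non_c.py | all_non_consecutive
-- ===== SOURCE A (Python) =====
-- def all_non_consecutive(arr):
--
--     x = []
--     num = arr[0]
--
--     for i, c in enumerate(arr):
--         if c != num:
--             x.append({"i": i, "n": c})
--             num = c
--         num += 1
--     return x
-- ===== SOURCE B (Python) =====
-- def all_non_consecutive(arr):
--     # Divide and conquer: split the index range in half; the only adjacency
--     # crossing the split is at `mid`, tested directly; recurse on both halves.
--     def go(lo, hi):
--         if hi - lo <= 1:
--             return []
--         mid = (lo + hi) // 2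
--         junction = [{"i": mid, "n": arr[mid]}] if arr[mid] != arr[mid - 1] + 1 else []
--         return go(lo, mid) + junction + go(mid, hi)
--     return go(0, len(arr))
-- ===== Notes on version B (the rewrite author's own statement) =====
-- stated objective: alternative
-- what changed: B replaces A's stateful linear scan with an expected-value counter by a divide-and-conquer recursion over index ranges: each call splits the range at its midpoint, tests only the single adjacency that crosses the split, and concatenates the recursive results in order.
import Mathlib
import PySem

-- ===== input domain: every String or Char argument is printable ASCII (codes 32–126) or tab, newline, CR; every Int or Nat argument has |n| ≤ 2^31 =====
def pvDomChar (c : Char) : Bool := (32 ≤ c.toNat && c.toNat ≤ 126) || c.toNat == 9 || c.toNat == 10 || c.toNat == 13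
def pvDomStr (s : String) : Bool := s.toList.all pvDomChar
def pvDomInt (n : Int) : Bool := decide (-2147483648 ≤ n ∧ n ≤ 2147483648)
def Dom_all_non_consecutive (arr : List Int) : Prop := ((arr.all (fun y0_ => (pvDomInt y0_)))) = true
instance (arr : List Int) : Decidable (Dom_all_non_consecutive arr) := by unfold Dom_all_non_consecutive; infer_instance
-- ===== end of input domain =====

-- B replaces A's stateful linear scan by a divide-and-conquer recursion over index
-- ranges, testing only the adjacency crossing each split (objective: alternative);
-- A raises IndexError on the empty list (excluded by Pre_), where B returns [].

-- ===== PORT A =====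
-- A's loop body: state (x, num); append and reset num when c != num, then num += 1.
def pvStepA (st : List (List (String × Int)) × Int) (p : Int × Int) :
    List (List (String × Int)) × Int :=
  if p.2 ≠ st.2 then (st.1 ++ [[("i", p.1), ("n", p.2)]], p.2 + 1) else (st.1, st.2 + 1)

def all_non_consecutive (arr : List Int) : List (List (String × Int)) :=
  match arr with
  | [] => []   -- Python raises IndexError at `arr[0]`; excluded by Pre_
  | a :: _ => ((PySem.List.enumerate arr 0).foldl pvStepA ([], a)).1

-- ===== PORT B =====
-- arr[i] for an index B only uses in range (exact there; out of range Python raises,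
-- which B's recursion never reaches)
def pvGetD (arr : List Int) (i : Int) : Int := (PySem.List.pyGet? arr i).getD 0

-- go(lo, hi), with fuel = range width as a structural totality guard (never exhausted:
-- each recursive call strictly shrinks hi - lo); mid = (lo + hi) // 2 written inline.
def pvGo (arr : List Int) : Nat → Int → Int → List (List (String × Int))
  | 0, _, _ => []
  | fuel + 1, lo, hi =>
    if hi - lo ≤ 1 then []
    else
      pvGo arr fuel lo (PySem.Int.floordiv (lo + hi) 2) ++
        (if pvGetD arr (PySem.Int.floordiv (lo + hi) 2)
              ≠ pvGetD arr (PySem.Int.floordiv (lo + hi) 2 - 1) + 1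
         then [[("i", PySem.Int.floordiv (lo + hi) 2),
                ("n", pvGetD arr (PySem.Int.floordiv (lo + hi) 2))]] else []) ++
        pvGo arr fuel (PySem.Int.floordiv (lo + hi) 2) hi

def all_non_consecutive_alt (arr : List Int) : List (List (String × Int)) :=
  pvGo arr arr.length 0 arr.length

-- ===== PRECONDITION & SPEC =====
-- Pre_ excludes only the empty list, where A raises IndexError reading arr[0].
def Pre_all_non_consecutive (arr : List Int) : Prop := arr ≠ []
instance (arr : List Int) : Decidable (Pre_all_non_consecutive arr) := by
  unfold Pre_all_non_consecutive; infer_instance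
def pvWitness_all_non_consecutive : List Int := [1, 2, 5]

def Spec_all_non_consecutive (arr : List Int) (out : List (List (String × Int))) : Prop :=
  out = all_non_consecutive_alt arr
instance (arr : List Int) (out : List (List (String × Int))) : Decidable (Spec_all_non_consecutive arr out) := by unfold Spec_all_non_consecutive; infer_instance

-- ===== CLAIM =====
def Claim_equal_all_non_consecutive : Prop := ∀ (arr : List Int), Dom_all_non_consecutive arr → Pre_all_non_consecutive arr → Spec_all_non_consecutive arr (all_non_consecutive arr)

-- ===== LEMMAS AND PROOFS =====

-- Canonical recursive description both programs are reduced to.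
def pvSpec (prev i : Int) : List Int → List (List (String × Int))
  | [] => []
  | c :: l => (if c ≠ prev + 1 then [[("i", i), ("n", c)]] else []) ++ pvSpec c (i + 1) l

-- A's fold invariant: after processing element prev, num = prev + 1.
theorem pv_fold_eq (l : List Int) : ∀ (prev i : Int) (acc : List (List (String × Int))),
    ((PySem.List.enumerate l i).foldl pvStepA (acc, prev + 1)).1 = acc ++ pvSpec prev i l := by
  induction l with
  | nil => intro prev i acc; simp [PySem.List.enumerate, pvSpec]
  | cons c rest ih =>
    intro prev i acc
    rw [PySem.List.enumerate_cons]
    show ((PySem.List.enumerate rest (i + 1)).foldl pvStepA (pvStepA (acc, prev + 1) (i, c))).1 = _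
    by_cases h : c = prev + 1
    · have hs : pvStepA (acc, prev + 1) (i, c) = (acc, c + 1) := by simp [pvStepA, h]
      rw [hs, ih c (i + 1) acc]; simp [pvSpec, h]
    · have hs : pvStepA (acc, prev + 1) (i, c) = (acc ++ [[("i", i), ("n", c)]], c + 1) := by
        simp [pvStepA, h]
      rw [hs, ih c (i + 1) _]; simp [pvSpec, h]

-- Flat index-range description of B's divide and conquer.
def pvTab (arr : List Int) (j hi : Int) : List (List (String × Int)) :=
  if hi ≤ j then []
  else (if pvGetD arr j ≠ pvGetD arr (j - 1) + 1
        then [[("i", j), ("n", pvGetD arr j)]] else []) ++ pvTab arr (j + 1) hi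
termination_by (hi - j).toNat
decreasing_by omega

theorem pvTab_split (arr : List Int) (mid : Int) : ∀ (j hi : Int), j ≤ mid → mid ≤ hi →
    pvTab arr j hi = pvTab arr j mid ++ pvTab arr mid hi := by
  intro j
  induction hn : (mid - j).toNat generalizing j with
  | zero =>
    intro hi hj hmh
    have hjm : j = mid := by omega
    subst hjm
    have hz : pvTab arr j j = [] := by rw [pvTab]; simp
    rw [hz, List.nil_append]
  | succ n ih =>
    intro hi hj hmh
    have hjm : j < mid := by omega
    have hL : pvTab arr j hi
        = (if pvGetD arr j ≠ pvGetD arr (j - 1) + 1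
           then [[("i", j), ("n", pvGetD arr j)]] else []) ++ pvTab arr (j + 1) hi := by
      rw [pvTab, if_neg (by omega : ¬ hi ≤ j)]
    have hM : pvTab arr j mid
        = (if pvGetD arr j ≠ pvGetD arr (j - 1) + 1
           then [[("i", j), ("n", pvGetD arr j)]] else []) ++ pvTab arr (j + 1) mid := by
      rw [pvTab, if_neg (by omega : ¬ mid ≤ j)]
    rw [hL, hM, ih (j + 1) (by omega) hi (by omega) hmh, List.append_assoc]

theorem pvGo_eq_tab (arr : List Int) : ∀ (fuel : Nat) (lo hi : Int), (hi - lo).toNat ≤ fuel →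
    pvGo arr fuel lo hi = pvTab arr (lo + 1) hi := by
  intro fuel
  induction fuel with
  | zero =>
    intro lo hi hf
    rw [pvGo, pvTab, if_pos (by omega)]
  | succ fuel ih =>
    intro lo hi hf
    rw [pvGo]
    by_cases h : hi - lo ≤ 1
    · rw [if_pos h, pvTab, if_pos (by omega)]
    · rw [if_neg h]
      have hmid := PySem.Int.floordiv_eq_ediv_of_pos (a := lo + hi) (by omega : (0:Int) < 2)
      set mid := PySem.Int.floordiv (lo + hi) 2 with hm
      have hb : lo + 1 ≤ mid ∧ mid + 1 ≤ hi := by omega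
      rw [ih lo mid (by omega), ih mid hi (by omega)]
      rw [pvTab_split arr mid (lo + 1) hi (by omega) (by omega)]
      have : pvTab arr mid hi
          = (if pvGetD arr mid ≠ pvGetD arr (mid - 1) + 1
             then [[("i", mid), ("n", pvGetD arr mid)]] else []) ++ pvTab arr (mid + 1) hi := by
        rw [pvTab, if_neg (by omega : ¬ hi ≤ mid)]
      rw [this, List.append_assoc]

theorem pvTab_eq_spec (rest : List Int) : ∀ (arr : List Int) (j prev : Int), 0 ≤ j →
    pvGetD arr (j - 1) = prev → arr.drop j.toNat = rest →
    pvTab arr j (j + rest.length) = pvSpec prev j rest := by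
  induction rest with
  | nil =>
    intro arr j prev _ _ _
    rw [pvTab, if_pos (by simp)]; rfl
  | cons c l ih =>
    intro arr j prev hj hprev hdrop
    have hget : pvGetD arr j = c := by
      have h0 : arr[j.toNat]? = some c := by
        have h : (arr.drop j.toNat)[0]? = arr[j.toNat + 0]? := List.getElem?_drop
        rw [hdrop] at h
        simpa using h.symm
      rw [pvGetD, PySem.List.pyGet?_of_nonneg (xs := arr) hj, h0]
      rfl
    have hdrop' : arr.drop (j + 1).toNat = l := by
      have h1 : (j + 1).toNat = j.toNat + 1 := by omega
      rw [h1, ← List.drop_drop, hdrop]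
      rfl
    have harith : j + ((c :: l).length : Int) = (j + 1) + (l.length : Int) := by
      simp; ring
    rw [pvTab, if_neg (by omega : ¬ j + ((c :: l).length : Int) ≤ j)]
    rw [hget, hprev, harith]
    rw [ih arr (j + 1) c (by omega) (by simpa using hget) hdrop']
    rfl

-- ===== VERDICT =====
theorem all_non_consecutive_spec : Claim_equal_all_non_consecutive := by
  intro arr _ hpre
  unfold Spec_all_non_consecutive
  match arr with
  | [] => exact absurd rfl hpre
  | a :: rest =>
    unfold all_non_consecutive all_non_consecutive_alt
    rw [PySem.List.enumerate_cons]
    have h0 : pvStepA ([], a) (0, a) = ([], a + 1) := by simp [pvStepA]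
    show ((PySem.List.enumerate rest (0 + 1)).foldl pvStepA (pvStepA ([], a) (0, a))).1 = _
    rw [h0, pv_fold_eq rest a (0 + 1) [],
        pvGo_eq_tab (a :: rest) (a :: rest).length 0 (a :: rest).length (by simp)]
    have hlen : ((a :: rest).length : Int) = (0 + 1) + (rest.length : Int) := by
      simp; omega
    rw [hlen, pvTab_eq_spec rest (a :: rest) (0 + 1) a (by omega) (by simp [pvGetD, PySem.List.pyGet?, PySem.List.pyIdx?]) (by simp)]
    simp
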